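-- pv_equiv track=rewrite | github.com/gaoc33721-ai/video-script-creator | api_app.py | _extract_first_md_table
-- ===== SOURCE A (Python) =====
-- def _extract_first_md_table(text: str):
--     if not text:
--         return [], ""
--     lines = str(text).splitlines()
--     table = []
--     started = False
--     end_idx = None
--     for idx, line in enumerate(lines):
--         stripped = line.strip()
--         if not started:
--             if stripped.startswith("|") and stripped.count("|") >= 2:
--                 started = True
--                 table.append(line)
--             continue
--         if stripped.startswith("|") and stripped.count("|") >= 2:
--             table.append(line)
--         else:
--             end_idx = idx
--             break
--     remainder = "\n".join(lines[end_idx:]).strip() if end_idx is not None else ""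
--     return table, remainder
-- ===== SOURCE B (Python) =====
-- def _extract_first_md_table(text: str):
--     if not text:
--         return [], ""
--     lines = str(text).splitlines()
--
--     def is_row(line):
--         s = line.strip()
--         return s.startswith("|") and s.count("|") >= 2
--
--     start = next((i for i, l in enumerate(lines) if is_row(l)), None)
--     if start is None:
--         return [], ""
--     end = next((j for j in range(start, len(lines)) if not is_row(lines[j])), None)
--     if end is None:
--         return lines[start:], ""
--     return lines[start:end], "\n".join(lines[end:]).strip()
-- ===== Notes on version B (the rewrite author's own statement) =====
-- stated objective: alternative
-- what changed: Replaces A's single stateful scan (started flag, incremental append, break with end_idx) by boundary finding: locate the first table-row line, then the first non-row line after it, and slice the line list at those two indices.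
import Mathlib
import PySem

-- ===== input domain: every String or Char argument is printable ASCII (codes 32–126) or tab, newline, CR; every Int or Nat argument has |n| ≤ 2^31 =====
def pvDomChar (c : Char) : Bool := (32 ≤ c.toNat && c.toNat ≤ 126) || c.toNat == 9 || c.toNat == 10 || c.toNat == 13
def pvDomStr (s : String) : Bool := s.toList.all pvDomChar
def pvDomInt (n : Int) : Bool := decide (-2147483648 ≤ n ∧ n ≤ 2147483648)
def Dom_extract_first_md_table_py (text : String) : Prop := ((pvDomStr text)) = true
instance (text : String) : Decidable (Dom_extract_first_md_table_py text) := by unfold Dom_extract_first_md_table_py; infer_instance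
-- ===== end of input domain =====

-- B replaces A's stateful single loop by boundary finding (first row, first non-row after it) plus slicing; same cost, different decomposition.

-- ===== PORT A =====
-- the loop over enumerate(lines): state = (table, started); breaking returns end_idx
def pvALoop : List String → Nat → List String → Bool → List String × Option Nat
  | [], _, table, _ => (table, none)
  | line :: rest, idx, table, started =>
    let stripped := PySem.Str.strip line
    if started = false then
      if PySem.Str.startswith stripped "|" && decide (2 ≤ PySem.Str.count stripped "|") then
        pvALoop rest (idx + 1) (table ++ [line]) true
      else
        pvALoop rest (idx + 1) table started
    else
      if PySem.Str.startswith stripped "|" && decide (2 ≤ PySem.Str.count stripped "|") then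
        pvALoop rest (idx + 1) (table ++ [line]) started
      else
        (table, some idx)

def extract_first_md_table_py (text : String) : List String × String :=
  if text = "" then ([], "")
  else
    let lines := PySem.Str.splitlines text
    let r := pvALoop lines 0 [] false
    let remainder : String :=
      match r.2 with
      | some i => PySem.Str.strip (PySem.Str.join "\n" (PySem.List.slice lines (some (i : Int)) none))
      | none => ""
    (r.1, remainder)

-- ===== PORT B =====
def pvIsRow (line : String) : Bool :=
  let s := PySem.Str.strip line
  PySem.Str.startswith s "|" && decide (2 ≤ PySem.Str.count s "|")

-- start = first index where is_row holds; end = first j ≥ start where it fails; slice.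
-- lines[start:end] / lines[end:] with natural-number bounds are exactly drop/take (PySem.List.slice_natCast).
def extract_first_md_table_py_alt (text : String) : List String × String :=
  if text = "" then ([], "")
  else
    let lines := PySem.Str.splitlines text
    match lines.findIdx? pvIsRow with
    | none => ([], "")
    | some s =>
      match (lines.drop s).findIdx? (fun l => !pvIsRow l) with
      | none => (lines.drop s, "")
      | some k =>
        ((lines.drop s).take k, PySem.Str.strip (PySem.Str.join "\n" (lines.drop (s + k))))

-- ===== PRECONDITION & SPEC =====
def Spec_extract_first_md_table_py (text : String) (out : List String × String) : Prop := out = extract_first_md_table_py_alt text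
instance (text : String) (out : List String × String) : Decidable (Spec_extract_first_md_table_py text out) := by unfold Spec_extract_first_md_table_py; infer_instance

-- ===== CLAIM (what is proved, stated in full; the proofs are below) =====
def Claim_equal_extract_first_md_table_py : Prop := ∀ (text : String), Dom_extract_first_md_table_py text → Spec_extract_first_md_table_py text (extract_first_md_table_py text)

-- ===== LEMMAS AND PROOFS =====

theorem pvALoop_step_true (line : String) (rest : List String) (idx : Nat) (table : List String) :
    pvALoop (line :: rest) idx table true =
      if pvIsRow line then pvALoop rest (idx + 1) (table ++ [line]) true
      else (table, some idx) := by
  simp [pvALoop, pvIsRow]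

theorem pvALoop_step_false (line : String) (rest : List String) (idx : Nat) (table : List String) :
    pvALoop (line :: rest) idx table false =
      if pvIsRow line then pvALoop rest (idx + 1) (table ++ [line]) true
      else pvALoop rest (idx + 1) table false := by
  simp [pvALoop, pvIsRow]

theorem pvALoop_started (lines : List String) (idx : Nat) (table : List String) :
    pvALoop lines idx table true =
      match lines.findIdx? (fun l => !pvIsRow l) with
      | none => (table ++ lines, none)
      | some k => (table ++ lines.take k, some (idx + k)) := by
  induction lines generalizing idx table with
  | nil => simp [pvALoop]
  | cons line rest ih =>
    rw [pvALoop_step_true, List.findIdx?_cons]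
    cases h : pvIsRow line with
    | false => simp
    | true =>
      rw [if_pos rfl, ih]
      cases hf : rest.findIdx? (fun l => !pvIsRow l) with
      | none => simp
      | some k =>
        simp [List.take_succ_cons]
        omega
  
theorem pvALoop_unstarted (lines : List String) (idx : Nat) :
    pvALoop lines idx [] false =
      match lines.findIdx? pvIsRow with
      | none => ([], none)
      | some s =>
        match (lines.drop s).findIdx? (fun l => !pvIsRow l) with
        | none => (lines.drop s, none)
        | some k => ((lines.drop s).take k, some (idx + s + k)) := by
  induction lines generalizing idx with
  | nil => simp [pvALoop]
  | cons line rest ih =>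
    rw [pvALoop_step_false, List.findIdx?_cons]
    cases h : pvIsRow line with
    | true =>
      rw [if_pos rfl, pvALoop_started rest (idx + 1) ([] ++ [line])]
      cases hf : rest.findIdx? (fun l => !pvIsRow l) with
      | none => simp [List.findIdx?_cons, h, hf]
      | some k =>
        simp [List.findIdx?_cons, h, hf, List.take_succ_cons]
        omega
    | false =>
      rw [if_neg (by simp [h]), ih]
      cases hf : rest.findIdx? pvIsRow with
      | none => simp [hf]
      | some s =>
        simp only [Option.map_some]
        cases hg : (rest.drop s).findIdx? (fun l => !pvIsRow l) with
        | none => simp [hg]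
        | some k =>
          simp [hg]
          omega

-- ===== VERDICT (by name: the statement is the Claim_ definition above) =====
theorem extract_first_md_table_py_spec : Claim_equal_extract_first_md_table_py := by
  intro text _
  unfold Spec_extract_first_md_table_py extract_first_md_table_py extract_first_md_table_py_alt
  by_cases ht : text = ""
  · simp [ht]
  · simp only [ht, if_false]
    set lines := PySem.Str.splitlines text with hl
    rw [pvALoop_unstarted lines 0]
    cases hf : lines.findIdx? pvIsRow with
    | none => simp
    | some s =>
      cases hg : (lines.drop s).findIdx? (fun l => !pvIsRow l) with
      | none => simp [hg]
      | some k =>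
        have hsl : PySem.List.slice lines (some ((s : Int) + (k : Int))) none = lines.drop (s + k) := by
          have h2 := PySem.List.slice_from_natCast lines (s + k)
          push_cast at h2
          exact h2
        simp [hg, hsl]
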